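-- pv_equiv track=rewrite | github.com/SiddiquiQasim/Estimating_Uncertainties_in_Deep_Learning_Based_Instance_Segmentation_models | instance_uncertainty/calibration_plot.py | new_bin_size
-- ===== SOURCE A (Python) =====
-- def new_bin_size(tp):
--     new_bin_size = {}
--     k = 1
--     for i in tp:
--         if k==1:
--             j = i
--             k+=1
--             continue
--         if k%2==0:
--             new_bin_size[i] = tp[i]+tp[j]
--         j = i
--         k+=1
--
--     return new_bin_size
-- ===== SOURCE B (Python) =====
-- def new_bin_size(tp):
--     stack = list(tp.items())
--     if len(stack) % 2:
--         stack.pop()           # A never pairs an unpaired trailing key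
--     out = {}
--     while stack:
--         b, vb = stack.pop()
--         a, va = stack.pop()
--         out[b] = vb + va
--     return dict(reversed(out.items()))
-- ===== Notes on version B (the rewrite author's own statement) =====
-- stated objective: alternative
-- what changed: Replaces A's forward single-pass state machine (parity counter k, remembered previous key j, dict lookups tp[i]+tp[j]) with an explicit stack consumed two items at a time from the END, summing the popped values directly, assembling the result dict back-to-front and reversing it once at the end.
import Mathlib
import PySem

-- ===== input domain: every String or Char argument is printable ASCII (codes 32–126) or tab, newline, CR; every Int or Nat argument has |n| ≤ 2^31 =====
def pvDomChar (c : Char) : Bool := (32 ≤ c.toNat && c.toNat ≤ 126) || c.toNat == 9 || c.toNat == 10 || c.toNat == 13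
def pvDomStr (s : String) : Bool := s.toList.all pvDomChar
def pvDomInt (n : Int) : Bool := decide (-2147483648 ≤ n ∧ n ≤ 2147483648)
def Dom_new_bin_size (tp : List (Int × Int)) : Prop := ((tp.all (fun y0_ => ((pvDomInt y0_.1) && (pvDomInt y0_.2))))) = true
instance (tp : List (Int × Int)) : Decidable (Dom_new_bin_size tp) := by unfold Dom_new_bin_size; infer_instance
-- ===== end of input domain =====

-- B replaces A's forward parity-counter/previous-key state machine (with dict lookups) by an
-- explicit stack consumed two items at a time from the END, assembling the result back-to-front
-- and reversing it once at the end (objective: alternative; same cost).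

-- ===== PORT A =====
-- A's loop body: state = (result dict, j = previously seen key, k = counter), exactly A's variables.
def pvStepA (d : PySem.Dict Int Int)
    (st : PySem.Dict Int Int × Option Int × Int) (i : Int) :
    PySem.Dict Int Int × Option Int × Int :=
  if st.2.2 == 1 then (st.1, some i, st.2.2 + 1)
  else
    let nb := if PySem.Int.mod st.2.2 2 == 0
      then st.1.insert i (d.getD i 0 + d.getD (st.2.1.getD 0) 0)
      else st.1
    (nb, some i, st.2.2 + 1)

def new_bin_size (tp : List (Int × Int)) : List (Int × Int) :=
  let d := PySem.Dict.ofList tp          -- the dict argument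
  ((d.keys).foldl (pvStepA d) (PySem.Dict.empty, none, 1)).1.items

-- ===== PORT B =====
-- the while loop: pop b then a off the end of the stack, record b ↦ vb + va
def pvLoopB (stack : List (Int × Int)) (out : PySem.Dict Int Int) : PySem.Dict Int Int :=
  match h : PySem.List.pop? stack with
  | none => out                          -- 'while stack:' — empty stack ends the loop
  | some ((b, vb), rest) =>
    match h2 : PySem.List.pop? rest with
    | none => out                        -- unreachable (the stack has even length); keeps the recursion total
    | some ((_, va), rest2) => pvLoopB rest2 (out.insert b (vb + va))
termination_by stack.length
decreasing_by
  have e1 := PySem.List.length_of_pop?_eq_some stack h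
  have e2 := PySem.List.length_of_pop?_eq_some rest h2
  simp at e1 e2; omega

def new_bin_size_alt (tp : List (Int × Int)) : List (Int × Int) :=
  let stack0 := (PySem.Dict.ofList tp).items                      -- stack = list(tp.items())
  let stack := if PySem.Int.mod (stack0.length : Int) 2 == 1      -- if len(stack) % 2: stack.pop()
    then stack0.dropLast else stack0
  let out := pvLoopB stack PySem.Dict.empty
  (PySem.Dict.ofList out.items.reverse).items                     -- dict(reversed(out.items()))

-- ===== PRECONDITION & SPEC =====
def Spec_new_bin_size (tp : List (Int × Int)) (out : List (Int × Int)) : Prop := out = new_bin_size_alt tp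
instance (tp : List (Int × Int)) (out : List (Int × Int)) : Decidable (Spec_new_bin_size tp out) := by unfold Spec_new_bin_size; infer_instance

-- ===== CLAIM (what is proved, stated in full; the proofs are below) =====
def Claim_equal_new_bin_size : Prop := ∀ (tp : List (Int × Int)), Dom_new_bin_size tp → Spec_new_bin_size tp (new_bin_size tp)

-- ===== LEMMAS AND PROOFS =====

-- the consecutive disjoint key pairs A's counter walks through
def pvPairs : List Int → List (Int × Int)
  | a :: b :: t => (a, b) :: pvPairs t
  | _ => []

-- the pair list both programs materialise: (second key, second value + first value), two items at a time
def pvSpine : List (Int × Int) → List (Int × Int)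
  | (_, va) :: (b, vb) :: rest => (b, vb + va) :: pvSpine rest
  | _ => []

theorem pvSpine_keys_sublist (l : List (Int × Int)) :
    ((pvSpine l).map Prod.fst).Sublist (l.map Prod.fst) := by
  match l with
  | [] => simp [pvSpine]
  | [p] => simp [pvSpine]
  | (a, va) :: (b, vb) :: rest =>
    have ih := pvSpine_keys_sublist rest
    simpa [pvSpine] using List.Sublist.cons _ (List.Sublist.cons₂ _ ih)

-- A's loop from an even counter k > 0 with remembered key x computes the fold over the pairs of (x :: l).
theorem loopA_even (d : PySem.Dict Int Int) (l : List Int) :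
    ∀ (x : Int) (acc : PySem.Dict Int Int) (k : Int),
    PySem.Int.mod k 2 = 0 → 0 < k →
    (l.foldl (pvStepA d) (acc, some x, k)).1 =
      (pvPairs (x :: l)).foldl
        (fun acc ab => acc.insert ab.2 (d.getD ab.2 0 + d.getD ab.1 0)) acc := by
  cases l with
  | nil => intro x acc k hk hk0; simp [pvPairs]
  | cons y t =>
    cases t with
    | nil =>
      intro x acc k hk hk0
      have hk1 : (k == 1) = false := by
        simp [PySem.Int.mod, Int.fmod_eq_emod] at hk ⊢; omega
      have hke : k % 2 = 0 := by simpa [PySem.Int.mod, Int.fmod_eq_emod] using hk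
      simp [List.foldl, pvPairs, pvStepA, hk1]
      intro h; omega
    | cons z rest =>
      intro x acc k hk hk0
      have hke : k % 2 = 0 := by simpa [PySem.Int.mod, Int.fmod_eq_emod] using hk
      have hk1 : (k == 1) = false := by simp; omega
      have hk2 : (k + 1 == 1) = false := by simp; omega
      have hodd : (PySem.Int.mod (k + 1) 2 == 0) = false := by
        simp [PySem.Int.mod, Int.fmod_eq_emod]; omega
      have e1 : pvStepA d (acc, some x, k) y
          = (acc.insert y (d.getD y 0 + d.getD x 0), some y, k + 1) := by
        simp [pvStepA, hk1]
        intro h; omega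
      have e2 : pvStepA d (acc.insert y (d.getD y 0 + d.getD x 0), some y, k + 1) z
          = (acc.insert y (d.getD y 0 + d.getD x 0), some z, k + 1 + 1) := by
        simp [pvStepA, hk2]
        intro h; omega
      rw [List.foldl_cons, e1, List.foldl_cons, e2]
      have := loopA_even d rest z (acc.insert y (d.getD y 0 + d.getD x 0)) (k + 1 + 1)
        (by simpa [PySem.Int.mod, Int.fmod_eq_emod] using (by omega : (k + 1 + 1) % 2 = 0)) (by omega)
      rw [this]
      simp [pvPairs]

-- A's pair fold over the keys of l is the insert fold over pvSpine l (values looked up = values carried).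
theorem pairsFold_eq_spineFold (d : PySem.Dict Int Int) (l : List (Int × Int))
    (hv : ∀ p ∈ l, d.getD p.1 0 = p.2) :
    ∀ acc : PySem.Dict Int Int,
    (pvPairs (l.map Prod.fst)).foldl
        (fun acc ab => acc.insert ab.2 (d.getD ab.2 0 + d.getD ab.1 0)) acc =
      (pvSpine l).foldl (fun acc p => acc.insert p.1 p.2) acc := by
  match l with
  | [] => intro acc; simp [pvPairs, pvSpine]
  | [p] => intro acc; simp [pvPairs, pvSpine]
  | (a, va) :: (b, vb) :: rest =>
    intro acc
    have ha : d.getD a 0 = va := hv (a, va) (by simp)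
    have hb : d.getD b 0 = vb := hv (b, vb) (by simp)
    have ih := pairsFold_eq_spineFold d rest
      (fun p hp => hv p (by simp [hp]))
      (acc.insert b (vb + va))
    simpa [pvPairs, pvSpine, ha, hb] using ih

-- the pairs B's stack pops, read off the REVERSED list: (b, vb+va) for consecutive (b,vb),(a,va)
def pvRevPairs : List (Int × Int) → List (Int × Int)
  | (b, vb) :: (_, va) :: t => (b, vb + va) :: pvRevPairs t
  | _ => []

-- B's while loop over r.reverse is the insert fold over pvRevPairs r.
theorem pvLoopB_eq (r : List (Int × Int)) :
    ∀ out : PySem.Dict Int Int, pvLoopB r.reverse out = out.update (pvRevPairs r) := by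
  match r with
  | [] =>
    intro out
    rw [pvLoopB.eq_def]
    split
    · simp [pvRevPairs, PySem.Dict.update]
    · rename_i b vb rest h
      simp [PySem.List.pop?, PySem.List.pyIdx?] at h
  | [x] =>
    intro out
    have h1 : PySem.List.pop? ([x] : List (Int × Int)).reverse = some (x, []) := by
      simpa using PySem.List.pop?_last ([] : List (Int × Int)) x
    rw [pvLoopB.eq_def]
    split
    · rename_i h; rw [h1] at h; cases h
    · rename_i b vb rest h
      rw [h1] at h
      obtain ⟨h2, h3⟩ := Prod.mk.injEq .. ▸ (Option.some.injEq .. ▸ h)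
      subst h3
      split
      · simp [pvRevPairs, PySem.Dict.update]
      · rename_i a va rest2 h4
        simp [PySem.List.pop?, PySem.List.pyIdx?] at h4
  | (b, vb) :: (a, va) :: t =>
    intro out
    have hr : ((b, vb) :: (a, va) :: t).reverse
        = (t.reverse ++ [(a, va)]) ++ [(b, vb)] := by simp
    have h1 : PySem.List.pop? (((b, vb) :: (a, va) :: t).reverse)
        = some ((b, vb), t.reverse ++ [(a, va)]) := by
      rw [hr]; exact PySem.List.pop?_last _ _
    have h2 : PySem.List.pop? (t.reverse ++ [(a, va)]) = some ((a, va), t.reverse) :=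
      PySem.List.pop?_last _ _
    rw [pvLoopB.eq_def]
    split
    · rename_i h; rw [h1] at h; cases h
    · rename_i b' vb' rest h
      rw [h1] at h
      obtain ⟨hbv, hrest⟩ := Prod.mk.injEq .. ▸ (Option.some.injEq .. ▸ h)
      subst hrest
      split
      · rename_i h'; rw [h2] at h'; cases h'
      · rename_i a' va' rest2 h'
        rw [h2] at h'
        obtain ⟨hav, hrest2⟩ := Prod.mk.injEq .. ▸ (Option.some.injEq .. ▸ h')
        subst hrest2
        have ih := pvLoopB_eq t (out.insert b (vb + va))
        have hb' : b' = b ∧ vb' = vb := by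
          have := congrArg Prod.fst hbv; have := congrArg Prod.snd hbv
          exact ⟨by simpa using (congrArg Prod.fst hbv).symm, by simpa using (congrArg Prod.snd hbv).symm⟩
        have hva' : va' = va := by simpa using (congrArg Prod.snd hav).symm
        rw [hb'.1, hb'.2, hva']
        simpa [pvRevPairs, PySem.Dict.update] using ih

theorem pvRevPairs_append (r : List (Int × Int)) (x y : Int × Int)
    (he : r.length % 2 = 0) :
    pvRevPairs (r ++ [x, y]) = pvRevPairs r ++ [(x.1, x.2 + y.2)] := by
  match r with
  | [] => simp [pvRevPairs]
  | [z] => simp at he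
  | (p :: q :: t) =>
    have ih := pvRevPairs_append t x y (by simp only [List.length_cons] at he; omega)
    simp [pvRevPairs, ih]

-- for an even-length l, the pairs popped off l's reverse are pvSpine l, back to front
theorem pvRevPairs_reverse (l : List (Int × Int)) (he : l.length % 2 = 0) :
    pvRevPairs l.reverse = (pvSpine l).reverse := by
  match l with
  | [] => simp [pvRevPairs, pvSpine]
  | [x] => simp at he
  | (a, va) :: (b, vb) :: rest =>
    have he' : rest.length % 2 = 0 := by simp only [List.length_cons] at he; omega
    have hr : ((a, va) :: (b, vb) :: rest).reverse
        = rest.reverse ++ [(b, vb), (a, va)] := by simp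
    rw [hr, pvRevPairs_append rest.reverse _ _ (by simpa using he'),
        pvRevPairs_reverse rest he']
    simp [pvSpine]

-- an odd-length list's unpaired last item never reaches the spine
theorem pvSpine_dropLast_odd (l : List (Int × Int)) (ho : l.length % 2 = 1) :
    pvSpine l.dropLast = pvSpine l := by
  match l with
  | [] => simp at ho
  | [x] => simp [pvSpine]
  | (a :: b :: rest) =>
    match rest with
    | [] => simp at ho
    | (c :: t) =>
      have ih := pvSpine_dropLast_odd (c :: t)
        (by simp only [List.length_cons] at ho ⊢; omega)
      obtain ⟨a1, a2⟩ := a; obtain ⟨b1, b2⟩ := b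
      simp only [List.dropLast_cons₂] at ih ⊢
      simp [pvSpine, ih]

-- the insert fold of a fresh-keyed pair list into the empty dict lists exactly those pairs
theorem items_update_empty (s : List (Int × Int)) (hnd : (s.map Prod.fst).Nodup) :
    ((PySem.Dict.empty : PySem.Dict Int Int).update s).items = s := by
  rw [show ((PySem.Dict.empty : PySem.Dict Int Int).update s) =
        s.foldl (fun d p => d.insert p.1 p.2) PySem.Dict.empty from rfl]
  have := PySem.Dict.items_foldl_insert_fresh (l := s)
    (k := Prod.fst) (v := Prod.snd) (d := (PySem.Dict.empty : PySem.Dict Int Int))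
    (by intro p _; simp) hnd
  simpa using this

-- B computes pvSpine of the items list, given distinct keys.
theorem altB_items (l : List (Int × Int)) (hnd : (l.map Prod.fst).Nodup) :
    (PySem.Dict.ofList
      ((pvLoopB (if PySem.Int.mod (l.length : Int) 2 == 1 then l.dropLast else l)
        PySem.Dict.empty).items.reverse)).items = pvSpine l := by
  have hspn : ((pvSpine l).map Prod.fst).Nodup :=
    (pvSpine_keys_sublist l).nodup hnd
  have key : (pvLoopB (if PySem.Int.mod (l.length : Int) 2 == 1 then l.dropLast else l)
        PySem.Dict.empty).items = (pvSpine l).reverse := by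
    have hm : PySem.Int.mod ((l.length : Int)) 2 = (l.length : Int) % 2 := by
      simp [PySem.Int.mod, Int.fmod_eq_emod]
    by_cases hpar : l.length % 2 = 1
    · have hcond : (PySem.Int.mod (l.length : Int) 2 == 1) = true := by
        rw [hm]; simp only [beq_iff_eq]; omega
      rw [hcond]
      simp only [if_true]
      have heven : l.dropLast.length % 2 = 0 := by
        rcases l with _ | ⟨x, t⟩
        · simp at hpar
        · simp only [List.length_dropLast]; simp at hpar ⊢; omega
      have hndd : (l.dropLast.map Prod.fst).Nodup :=
        ((l.dropLast_sublist.map Prod.fst).nodup hnd)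
      have hspn' : ((pvSpine l.dropLast).map Prod.fst).Nodup :=
        (pvSpine_keys_sublist l.dropLast).nodup hndd
      calc (pvLoopB l.dropLast PySem.Dict.empty).items
          = (pvLoopB l.dropLast.reverse.reverse PySem.Dict.empty).items := by simp
        _ = ((PySem.Dict.empty : PySem.Dict Int Int).update
              (pvRevPairs l.dropLast.reverse)).items := by rw [pvLoopB_eq]
        _ = ((PySem.Dict.empty : PySem.Dict Int Int).update
              ((pvSpine l.dropLast).reverse)).items := by
              rw [pvRevPairs_reverse _ heven]
        _ = (pvSpine l.dropLast).reverse := by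
              exact items_update_empty _ (by rw [List.map_reverse]; exact List.nodup_reverse.mpr hspn')
        _ = (pvSpine l).reverse := by rw [pvSpine_dropLast_odd l hpar]
    · have heven : l.length % 2 = 0 := by omega
      have hcond : (PySem.Int.mod (l.length : Int) 2 == 1) = false := by
        rw [hm]; simp only [beq_eq_false_iff_ne, ne_eq]; omega
      rw [hcond]
      simp only [Bool.false_eq_true, if_false]
      calc (pvLoopB l PySem.Dict.empty).items
          = (pvLoopB l.reverse.reverse PySem.Dict.empty).items := by simp
        _ = ((PySem.Dict.empty : PySem.Dict Int Int).update
              (pvRevPairs l.reverse)).items := by rw [pvLoopB_eq]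
        _ = ((PySem.Dict.empty : PySem.Dict Int Int).update
              ((pvSpine l).reverse)).items := by rw [pvRevPairs_reverse _ heven]
        _ = (pvSpine l).reverse := by
              exact items_update_empty _ (by rw [List.map_reverse]; exact List.nodup_reverse.mpr hspn)
  rw [show PySem.Dict.ofList
        ((pvLoopB (if PySem.Int.mod (l.length : Int) 2 == 1 then l.dropLast else l)
          PySem.Dict.empty).items.reverse)
      = (PySem.Dict.empty : PySem.Dict Int Int).update
        ((pvLoopB (if PySem.Int.mod (l.length : Int) 2 == 1 then l.dropLast else l)
          PySem.Dict.empty).items.reverse) from rfl]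
  rw [key]
  simpa using items_update_empty (pvSpine l) hspn

-- the whole equation, stated over any dict with distinct keys and consistent lookups
theorem main_eq (d : PySem.Dict Int Int) (hnd : d.keys.Nodup)
    (hv : ∀ p ∈ d.items, d.getD p.1 0 = p.2) :
    (List.foldl (pvStepA d) (PySem.Dict.empty, none, 1) d.keys).1.items =
    (PySem.Dict.ofList
      (pvLoopB (if PySem.Int.mod ((d.items.length : Int)) 2 == 1
          then d.items.dropLast else d.items) PySem.Dict.empty).items.reverse).items := by
  have hkeys : d.keys = d.items.map Prod.fst := rfl
  have hnd' : (d.items.map Prod.fst).Nodup := hkeys ▸ hnd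
  have hB := altB_items d.items hnd'
  rw [hB]
  cases h : d.keys with
  | nil =>
    have hit : d.items = [] := List.map_eq_nil_iff.mp (hkeys ▸ h)
    rw [hit]
    simp [pvSpine, PySem.Dict.empty]
  | cons x rest =>
    simp only [List.foldl]
    have h1 : pvStepA d (PySem.Dict.empty, none, 1) x
        = (PySem.Dict.empty, some x, 2) := by
      simp [pvStepA]
    rw [h1, loopA_even _ rest x PySem.Dict.empty 2 (by decide) (by decide)]
    rw [show (x :: rest) = d.items.map Prod.fst from (hkeys ▸ h).symm]
    rw [pairsFold_eq_spineFold d d.items hv PySem.Dict.empty]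
    -- A's insert fold of pvSpine into the empty dict lists exactly those pairs
    exact items_update_empty (pvSpine d.items)
      ((pvSpine_keys_sublist d.items).nodup hnd')

-- ===== VERDICT (by name: the statement is the Claim_ definition above) =====
theorem new_bin_size_spec : Claim_equal_new_bin_size := by
  intro tp _
  exact main_eq (PySem.Dict.ofList tp) (PySem.Dict.nodup_keys_ofList tp)
    (fun p hp => by
      obtain ⟨k, v⟩ := p
      exact PySem.Dict.getD_of_mem_items _ hp (PySem.Dict.nodup_keys_ofList tp) 0)
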